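-- pv_equiv track=rewrite | github.com/BESSER-PEARL/BESSER-Agentic-Framework | besser/agent/db/db_handler.py | _extract_db_configs
-- ===== SOURCE A (Python) =====
-- from typing import TYPE_CHECKING, Any
--
-- def _extract_db_configs(config: dict[str, Any]) -> dict[str, dict[str, Any]]:
--     db_configs: dict[str, dict[str, Any]] = {}
--     prefix = 'db.sql.'
--
--     for key, value in config.items():
--         if not key.startswith(prefix):
--             continue
--         remainder = key[len(prefix):]
--         if '.' not in remainder:
--             continue
--         db_name, property_name = remainder.split('.', 1)
--         db_configs.setdefault(db_name, {})[property_name] = value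
--
--     return db_configs
-- ===== SOURCE B (Python) =====
-- def _parse(key, value):
--     prefix = 'db.sql.'
--     if key.startswith(prefix) and '.' in (rest := key[len(prefix):]):
--         name, prop = rest.split('.', 1)
--         return name, prop, value
--     return None
--
--
-- def _extract_db_configs(config):
--     triples = [t for t in (_parse(k, v) for k, v in config.items()) if t is not None]
--     names = list(dict.fromkeys(name for name, _, _ in triples))
--     return {name: {prop: value for group, prop, value in triples if group == name}
--             for name in names}
-- ===== Notes on version B (the rewrite author's own statement) =====
-- stated objective: alternative
-- what changed: A builds the nested dict in one pass, mutating an inner dict per key via setdefault; B first comprehends the full list of parsed (db_name, property, value) triples, dedups the db names in first-occurrence order, and then builds the result with one dict comprehension per name over the grouped triples.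
import Mathlib
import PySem

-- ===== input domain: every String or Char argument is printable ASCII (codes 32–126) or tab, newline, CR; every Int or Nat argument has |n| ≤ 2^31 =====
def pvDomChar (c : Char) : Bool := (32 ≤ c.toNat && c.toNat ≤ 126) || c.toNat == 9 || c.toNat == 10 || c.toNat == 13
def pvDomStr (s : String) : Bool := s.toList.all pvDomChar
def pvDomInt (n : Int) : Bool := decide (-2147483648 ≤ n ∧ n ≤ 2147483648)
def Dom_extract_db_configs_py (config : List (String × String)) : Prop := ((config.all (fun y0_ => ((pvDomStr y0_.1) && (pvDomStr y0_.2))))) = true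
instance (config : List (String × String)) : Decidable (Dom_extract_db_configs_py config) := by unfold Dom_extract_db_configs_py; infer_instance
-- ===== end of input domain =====

-- B replaces A's single pass of nested dict mutation by a parse-all / dedup-names / group
-- decomposition (objective: alternative decomposition, same observable result).

-- ===== PORT A =====
-- one loop; for each matching key, setdefault(db_name, {})[property_name] = value
def extract_db_configs_py (config : List (String × String)) : List (String × List (String × String)) :=
  (config.foldl (fun db_configs kv =>
      if !(PySem.Str.startswith kv.1 "db.sql.") then db_configs      -- continue
      else
        let remainder := PySem.Chars.slice kv.1.toList (some 7) none -- key[len(prefix):]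
        if !(PySem.Chars.isIn ['.'] remainder) then db_configs       -- continue
        else
          match PySem.Chars.splitOnMax remainder ['.'] 1 with        -- remainder.split('.', 1)
          | db_name :: property_name :: _ =>
              -- db_configs.setdefault(db_name, {})[property_name] = value
              let d1 := db_configs.setdefault (String.ofList db_name) PySem.Dict.empty
              d1.insert (String.ofList db_name)
                ((d1.getD (String.ofList db_name) PySem.Dict.empty).insert (String.ofList property_name) kv.2)
          | _ => db_configs)
    (PySem.Dict.empty : PySem.Dict String (PySem.Dict String String))).items.map
    (fun p => (p.1, p.2.items))

-- ===== PORT B =====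
def pvParse (kv : String × String) : Option (String × String × String) :=
  if PySem.Str.startswith kv.1 "db.sql." then
    let rest := PySem.Chars.slice kv.1.toList (some 7) none
    if PySem.Chars.isIn ['.'] rest then
      match PySem.Chars.splitOnMax rest ['.'] 1 with
      | [] => none
      | [_] => none
      | name :: prop :: _ => some (String.ofList name, String.ofList prop, kv.2)
    else none
  else none

def extract_db_configs_py_alt (config : List (String × String)) : List (String × List (String × String)) :=
  let triples := config.filterMap pvParse
  let names := PySem.List.dedup (triples.map (·.1))
  (names.foldl (fun out name =>
      out.insert name
        ((triples.filter (fun t => t.1 == name)).foldl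
          (fun g t => g.insert t.2.1 t.2.2) (PySem.Dict.empty : PySem.Dict String String)))
    (PySem.Dict.empty : PySem.Dict String (PySem.Dict String String))).items.map
    (fun p => (p.1, p.2.items))

-- ===== PRECONDITION & SPEC =====
def Spec_extract_db_configs_py (config : List (String × String)) (out : List (String × List (String × String))) : Prop := out = extract_db_configs_py_alt config
instance (config : List (String × String)) (out : List (String × List (String × String))) : Decidable (Spec_extract_db_configs_py config out) := by unfold Spec_extract_db_configs_py; infer_instance

-- ===== CLAIM (what is proved, stated in full; the proofs are below) =====
def Claim_equal_extract_db_configs_py : Prop := ∀ (config : List (String × String)), Dom_extract_db_configs_py config → Spec_extract_db_configs_py config (extract_db_configs_py config)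

-- ===== LEMMAS AND PROOFS =====

-- A's loop step, written as a function of the parsed triple
def pvStep (d : PySem.Dict String (PySem.Dict String String)) (t : String × String × String) :
    PySem.Dict String (PySem.Dict String String) :=
  let d1 := d.setdefault t.1 PySem.Dict.empty
  d1.insert t.1 ((d1.getD t.1 PySem.Dict.empty).insert t.2.1 t.2.2)

-- inner dict of B for one name
def pvInner (ts : List (String × String × String)) (name : String) : PySem.Dict String String :=
  (ts.filter (fun t => t.1 == name)).foldl (fun g t => g.insert t.2.1 t.2.2) PySem.Dict.empty

lemma pvStep_eq (d : PySem.Dict String (PySem.Dict String String)) (t : String × String × String) :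
    pvStep d t = d.insert t.1 ((d.getD t.1 PySem.Dict.empty).insert t.2.1 t.2.2) := by
  unfold pvStep
  by_cases h : d.contains t.1 = true
  · rw [PySem.Dict.setdefault_of_contains _ _ h]
  · rw [PySem.Dict.setdefault_of_not_contains _ _ (by simpa using h)]
    show (d.insert t.1 PySem.Dict.empty).insert t.1
        (((d.insert t.1 PySem.Dict.empty).getD t.1 PySem.Dict.empty).insert t.2.1 t.2.2) = _
    rw [PySem.Dict.getD_insert_self, PySem.Dict.insert_insert_self,
        PySem.Dict.getD_of_not_contains _ _ (by simpa using h)]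

-- A's fold over config is the fold of pvStep over the parsed triples
lemma pvFold_filterMap (config : List (String × String))
    (d : PySem.Dict String (PySem.Dict String String)) :
    config.foldl (fun db_configs kv =>
      if !(PySem.Str.startswith kv.1 "db.sql.") then db_configs
      else
        let remainder := PySem.Chars.slice kv.1.toList (some 7) none
        if !(PySem.Chars.isIn ['.'] remainder) then db_configs
        else
          match PySem.Chars.splitOnMax remainder ['.'] 1 with
          | db_name :: property_name :: _ =>
              let d1 := db_configs.setdefault (String.ofList db_name) PySem.Dict.empty
              d1.insert (String.ofList db_name)
                ((d1.getD (String.ofList db_name) PySem.Dict.empty).insert (String.ofList property_name) kv.2)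
          | _ => db_configs) d
    = (config.filterMap pvParse).foldl pvStep d := by
  induction config generalizing d with
  | nil => rfl
  | cons kv rest ih =>
    simp only [List.foldl_cons, List.filterMap_cons]
    have hbody : ∀ d', (if !(PySem.Str.startswith kv.1 "db.sql.") then d'
        else
          let remainder := PySem.Chars.slice kv.1.toList (some 7) none
          if !(PySem.Chars.isIn ['.'] remainder) then d'
          else
            match PySem.Chars.splitOnMax remainder ['.'] 1 with
            | db_name :: property_name :: _ =>
                let d1 := d'.setdefault (String.ofList db_name) PySem.Dict.empty
                d1.insert (String.ofList db_name)
                  ((d1.getD (String.ofList db_name) PySem.Dict.empty).insert (String.ofList property_name) kv.2)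
            | _ => d')
        = (match pvParse kv with
           | some t => pvStep d' t
           | none => d') := by
      intro d'
      unfold pvParse
      cases hsw : PySem.Str.startswith kv.1 "db.sql." with
      | false => simp only [Bool.not_false, if_true, Bool.false_eq_true, if_false]
      | true =>
        cases hin : PySem.Chars.isIn ['.'] (PySem.Chars.slice kv.1.toList (some 7) none) with
        | false => simp only [hin, Bool.not_true, Bool.not_false, Bool.false_eq_true,
            if_false, if_true]
        | true =>
          simp only [hin, Bool.not_true, Bool.false_eq_true, if_false, if_true]
          cases hs : PySem.Chars.splitOnMax (PySem.Chars.slice kv.1.toList (some 7) none) ['.'] 1 with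
          | nil => rfl
          | cons a tl => cases tl <;> rfl
    rw [hbody d]
    cases hp : pvParse kv with
    | none => simpa using ih d
    | some t => simpa using ih (pvStep d t)

-- the heart: the fold of pvStep groups exactly as B's name-indexed construction
lemma pvMain (ts : List (String × String × String)) :
    (ts.foldl pvStep PySem.Dict.empty).items
      = (PySem.List.dedup (ts.map (·.1))).map (fun n => (n, pvInner ts n)) := by
  induction ts using List.reverseRecOn with
  | nil => rfl
  | append_singleton ts t ih =>
    simp only [PySem.List.dedup_eq_ofList] at ih ⊢
    have hnames : (ts.foldl pvStep PySem.Dict.empty).keys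
        = PySem.Set.ofList (ts.map (·.1)) := by
      show ((ts.foldl pvStep PySem.Dict.empty).items).map (·.1) = _
      rw [ih, List.map_map]
      exact List.map_id' _
    have hnodup : (ts.foldl pvStep PySem.Dict.empty).keys.Nodup := by
      rw [hnames]; exact PySem.Set.nodup_ofList _
    set D := ts.foldl pvStep PySem.Dict.empty with hD
    rw [List.foldl_append, List.foldl_cons, List.foldl_nil, pvStep_eq]
    have hmemdedup : t.1 ∈ PySem.Set.ofList (ts.map (·.1)) ↔ t.1 ∈ ts.map (·.1) :=
      PySem.Set.mem_ofList _ _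
    have hinner_ne : ∀ n, n ≠ t.1 → pvInner (ts ++ [t]) n = pvInner ts n := by
      intro n hn
      unfold pvInner
      rw [List.filter_append]
      have ht : (t.1 == n) = false := by simp [Ne.symm hn]
      simp only [List.filter_cons, ht, Bool.false_eq_true, if_false, List.filter_nil,
        List.append_nil]
    have hmapfst : (ts ++ [t]).map (·.1) = ts.map (·.1) ++ [t.1] := by simp
    rw [hmapfst, PySem.Set.ofList_append_singleton]
    by_cases hmem : t.1 ∈ ts.map (·.1)
    · -- the db name was seen before: in-place update, name list unchanged
      have hc : D.contains t.1 = true :=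
        (PySem.Dict.contains_iff_mem_keys D t.1).mpr (hnames ▸ hmemdedup.mpr hmem)
      have hgetD : D.getD t.1 PySem.Dict.empty = pvInner ts t.1 := by
        apply PySem.Dict.getD_of_mem_items D _ hnodup
        rw [ih]
        exact List.mem_map_of_mem (hmemdedup.mpr hmem)
      rw [PySem.Dict.items_insert_of_contains D _ hc, ih, hgetD,
          PySem.Set.add_of_mem (hmemdedup.mpr hmem), List.map_map]
      apply List.map_congr_left
      intro n hn
      by_cases hnt : n = t.1
      · subst hnt
        simp only [Function.comp_apply, beq_self_eq_true, if_true]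
        have ht : List.filter (fun x => x.1 == t.1) [t] = [t] := by simp
        unfold pvInner
        rw [List.filter_append, ht, List.foldl_append, List.foldl_cons, List.foldl_nil]
      · simp only [Function.comp_apply]
        rw [if_neg (by simpa using hnt), hinner_ne n hnt]
    · -- a new db name: appended at the end
      have hc : D.contains t.1 = false := by
        rw [← Bool.not_eq_true]
        intro hcon
        exact hmem (hmemdedup.mp (hnames ▸ (PySem.Dict.contains_iff_mem_keys D t.1).mp hcon))
      rw [PySem.Dict.items_insert_of_not_contains D _ hc,
          PySem.Dict.getD_of_not_contains D _ hc, ih,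
          PySem.Set.add_of_not_mem (fun h => hmem (hmemdedup.mp h)), List.map_append]
      congr 1
      · apply List.map_congr_left
        intro n hn
        have hnt : n ≠ t.1 := by
          intro h; subst h
          exact hmem (hmemdedup.mp hn)
        rw [hinner_ne n hnt]
      · simp only [List.map_cons, List.map_nil]
        have hlast : pvInner (ts ++ [t]) t.1 = PySem.Dict.empty.insert t.2.1 t.2.2 := by
          unfold pvInner
          rw [List.filter_append]
          have h1 : List.filter (fun x => x.1 == t.1) ts = [] := by
            rw [List.filter_eq_nil_iff]
            intro x hx
            simp only [beq_iff_eq]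
            intro h; exact hmem (h ▸ List.mem_map_of_mem hx)
          have h2 : List.filter (fun x => x.1 == t.1) [t] = [t] := by simp
          rw [h1, h2, List.nil_append, List.foldl_cons, List.foldl_nil]
        rw [hlast]

-- B's outer fold over the (distinct) names appends one entry per name
lemma pvAlt_items (config : List (String × String)) :
    extract_db_configs_py_alt config
      = ((PySem.List.dedup ((config.filterMap pvParse).map (·.1))).map
          (fun n => (n, pvInner (config.filterMap pvParse) n))).map (fun p => (p.1, p.2.items)) := by
  unfold extract_db_configs_py_alt
  have hfresh := PySem.Dict.items_foldl_insert_fresh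
    (l := PySem.List.dedup ((config.filterMap pvParse).map (·.1)))
    (k := fun n => n) (v := fun n => pvInner (config.filterMap pvParse) n)
    (d := PySem.Dict.empty)
    (by intro a _; exact PySem.Dict.contains_empty a)
    (by simp [PySem.List.dedup_eq_ofList])
  simp only [pvInner] at hfresh
  simp only [pvInner]
  rw [hfresh]
  rfl

-- ===== VERDICT (by name: the statement is the Claim_ definition above) =====
theorem extract_db_configs_py_spec : Claim_equal_extract_db_configs_py := by
  intro config _
  unfold Spec_extract_db_configs_py
  rw [pvAlt_items]
  unfold extract_db_configs_py
  rw [pvFold_filterMap, pvMain]
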